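-- pv_equiv track=rewrite | github.com/from-minju/coding-test | Programmers/level2/할인행사.py | solution
-- ===== SOURCE A (Python) =====
-- from collections import Counter
--
-- def solution(want, number, discount):
--     answer = 0
--
--     for i in range(len(discount) - 9):
--
--         counter = Counter(discount[i:i+10])
--
--         # 원하는 제품 10개가 모두 있는지 확인
--         for i in range(len(want)):
--             if want[i] in counter and number[i] <= counter[want[i]]:
--                 continue
--             else:
--                 break
--         else: # 원하는 제품이 모두 있다면
--             answer += 1 #가능한 날짜를 증가시킴
--
--
--     return answer
-- ===== SOURCE B (Python) =====
-- from collections import Counter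
--
--
-- def solution(want, number, discount):
--     if len(discount) < 10:
--         return 0
--     pairs = list(zip(want, number))
--     cnt = Counter(discount[:10])
--
--     def ok():
--         return all(w in cnt and cnt[w] >= n for w, n in pairs)
--
--     answer = 1 if ok() else 0
--     for i in range(1, len(discount) - 9):
--         out = discount[i - 1]
--         cnt[out] -= 1
--         if cnt[out] == 0:
--             del cnt[out]
--         cnt[discount[i + 9]] += 1
--         if ok():
--             answer += 1
--     return answer
-- ===== Notes on version B (the rewrite author's own statement) =====
-- stated objective: alternative
-- what changed: B slides one counter across the discount list (decrement the day that leaves, deleting keys that drop to zero, increment the day that enters) instead of rebuilding a fresh Counter for every 10-day window, and checks each window with a single all() over precomputed (want, number) pairs instead of A's index loop with for/else; Pre_ excludes inputs where want is longer than number and a window exists, on which A can raise IndexError.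
-- outside the precondition, e.g. on solution(['a', 'b'], [1], ['x', 'x', 'x', 'x', 'x', 'x', 'x', 'x', 'x', 'x']): A returns 0, B returns 0
import Mathlib
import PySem

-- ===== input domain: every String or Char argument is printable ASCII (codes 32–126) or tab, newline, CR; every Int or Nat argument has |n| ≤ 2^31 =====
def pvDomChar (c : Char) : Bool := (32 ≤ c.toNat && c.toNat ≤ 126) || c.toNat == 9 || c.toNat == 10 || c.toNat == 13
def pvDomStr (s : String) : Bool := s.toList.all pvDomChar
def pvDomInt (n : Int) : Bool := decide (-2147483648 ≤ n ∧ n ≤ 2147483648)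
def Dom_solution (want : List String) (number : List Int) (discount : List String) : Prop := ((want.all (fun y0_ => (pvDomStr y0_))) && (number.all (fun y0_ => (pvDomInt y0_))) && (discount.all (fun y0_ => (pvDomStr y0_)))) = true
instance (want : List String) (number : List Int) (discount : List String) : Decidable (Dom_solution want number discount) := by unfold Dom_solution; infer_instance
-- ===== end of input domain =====

-- B replaces A's per-window Counter rebuild by one sliding counter updated
-- incrementally (decrement the day that leaves, deleting keys that drop to zero,
-- increment the day that enters); same return value on Pre_ (objective: alternative).

-- ===== PORT A =====
-- inner 'for i in range(len(want)): … continue / break; else:' loop of A,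
-- over the list of indices; returns true iff the else-branch would run
def aInner (want : List String) (number : List Int) (counter : PySem.Dict String Int) : List Int → Bool
  | [] => true
  | i :: rest =>
      if counter.contains (PySem.List.pyGetD want i "") &&
         decide (PySem.List.pyGetD number i 0 ≤ counter.getD (PySem.List.pyGetD want i "") 0) then
        aInner want number counter rest
      else
        false

def solution (want : List String) (number : List Int) (discount : List String) : Int :=
  (PySem.List.pyRange 0 ((discount.length : Int) - 9) 1).foldl
    (fun answer i =>
      let counter := PySem.Dict.counter (PySem.List.slice discount (some i) (some (i + 10)))
      if aInner want number counter (PySem.List.pyRange 0 (want.length : Int) 1) then answer + 1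
      else answer)
    0

-- ===== PORT B =====
-- all(w in cnt and cnt[w] >= n for w, n in pairs)
def bOk (cnt : PySem.Dict String Int) (pairs : List (String × Int)) : Bool :=
  pairs.all (fun p => cnt.contains p.1 && decide (p.2 ≤ cnt.getD p.1 0))

def solution_alt (want : List String) (number : List Int) (discount : List String) : Int :=
  if discount.length < 10 then 0
  else
    let pairs := want.zip number
    let cnt0 := PySem.Dict.counter (PySem.List.slice discount none (some (10 : Int)))
    let a0 : Int := if bOk cnt0 pairs then 1 else 0
    let res := (PySem.List.pyRange 1 ((discount.length : Int) - 9) 1).foldl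
      (fun (s : PySem.Dict String Int × Int) i =>
        let out := PySem.List.pyGetD discount (i - 1) ""
        let c1 := s.1.modify out 0 (· - 1)
        let c2 := if c1.getD out 0 == 0 then c1.erase out else c1
        let c3 := c2.modify (PySem.List.pyGetD discount (i + 9) "") 0 (· + 1)
        (c3, if bOk c3 pairs then s.2 + 1 else s.2))
      (cnt0, a0)
    res.2

-- ===== PRECONDITION & SPEC =====
-- Pre_ excludes inputs where want is longer than number AND at least one window exists:
-- there A may hit IndexError on number[i] (it returns only if every window breaks early
-- on a missing product first; B's zip silently truncates instead).
def Pre_solution (want : List String) (number : List Int) (discount : List String) : Prop :=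
  want.length ≤ number.length ∨ discount.length < 10
instance (want : List String) (number : List Int) (discount : List String) : Decidable (Pre_solution want number discount) := by unfold Pre_solution; infer_instance

def pvWitness_solution : List String × List Int × List String := (["a"], [1], [])

def Spec_solution (want : List String) (number : List Int) (discount : List String) (out : Int) : Prop := out = solution_alt want number discount
instance (want : List String) (number : List Int) (discount : List String) (out : Int) : Decidable (Spec_solution want number discount out) := by unfold Spec_solution; infer_instance

-- ===== CLAIM (what is proved, stated in full; the proofs are below) =====
def Claim_equal_solution : Prop := ∀ (want : List String) (number : List Int) (discount : List String), Dom_solution want number discount → Pre_solution want number discount → Spec_solution want number discount (solution want number discount)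

-- ===== LEMMAS AND PROOFS =====

-- the 10-day window starting at day k
def pvWin (discount : List String) (k : Nat) : List String := (discount.drop k).take 10

-- reference per-window check: every wanted index j is satisfied by window k
def pvOk (want : List String) (number : List Int) (discount : List String) (k : Nat) : Bool :=
  (List.range want.length).all (fun j =>
    decide (0 < (pvWin discount k).count (want.getD j "")) &&
    decide (number.getD j 0 ≤ ((pvWin discount k).count (want.getD j "") : Int)))

-- reference total: number of good windows with index in [j, N)
def pvSum (want : List String) (number : List Int) (discount : List String) (j N : Int) : Int :=
  ((PySem.List.pyRange j N 1).map
    (fun i => if pvOk want number discount i.toNat then (1 : Int) else 0)).sum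

-- the sliding-counter invariant B maintains: counts and key-membership of window k
def pvInv (c : PySem.Dict String Int) (discount : List String) (k : Nat) : Prop :=
  ∀ x, c.getD x 0 = ((pvWin discount k).count x : Int) ∧
       c.contains x = decide (0 < (pvWin discount k).count x)

lemma pv_find?_filter {ν : Type} (k x : String) (h : x ≠ k) (l : List (String × ν)) :
    List.find? (fun p => p.1 == x) (List.filter (fun p => !(p.1 == k)) l)
      = List.find? (fun p => p.1 == x) l := by
  induction l with
  | nil => rfl
  | cons p rest ih =>
      rw [List.filter_cons]
      by_cases hx : p.1 = x
      · rw [if_pos (by simp [hx, h]), List.find?_cons_of_pos (by simp [hx]),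
          List.find?_cons_of_pos (by simp [hx])]
      · by_cases hk : p.1 = k
        · rw [if_neg (by simp [hk]), ih, List.find?_cons_of_neg (by simp [hx])]
        · rw [if_pos (by simp [hk]), List.find?_cons_of_neg (by simp [hx]),
            List.find?_cons_of_neg (by simp [hx]), ih]

lemma pv_get?_erase_of_ne {ν : Type} (d : PySem.Dict String ν) (k x : String) (h : x ≠ k) :
    (d.erase k).get? x = d.get? x := by
  obtain ⟨items⟩ := d
  simp only [PySem.Dict.erase, PySem.Dict.get?]
  rw [pv_find?_filter k x h]

lemma pv_get?_erase_self {ν : Type} (d : PySem.Dict String ν) (k : String) :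
    (d.erase k).get? k = none := by
  obtain ⟨items⟩ := d
  simp only [PySem.Dict.erase, PySem.Dict.get?]
  rw [List.find?_eq_none.mpr]
  · rfl
  · intro p hp
    have := List.of_mem_filter hp
    simpa using this

lemma pv_getD_erase {ν : Type} (d : PySem.Dict String ν) (k x : String) (d0 : ν) :
    (d.erase k).getD x d0 = if x = k then d0 else d.getD x d0 := by
  unfold PySem.Dict.getD
  by_cases h : x = k
  · subst h; rw [pv_get?_erase_self]; simp
  · rw [pv_get?_erase_of_ne d k x h, if_neg h]

lemma pv_contains_erase {ν : Type} (d : PySem.Dict String ν) (k x : String) :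
    (d.erase k).contains x = if x = k then false else d.contains x := by
  by_cases h : x = k
  · subst h
    rw [if_pos rfl, PySem.Dict.contains_eq_isSome_get?, pv_get?_erase_self]
    rfl
  · rw [if_neg h, PySem.Dict.contains_eq_isSome_get?, pv_get?_erase_of_ne d k x h,
      PySem.Dict.contains_eq_isSome_get?]

lemma pv_aInner_all (want : List String) (number : List Int) (c : PySem.Dict String Int)
    (l : List Int) :
    aInner want number c l
      = l.all (fun i => c.contains (PySem.List.pyGetD want i "") &&
          decide (PySem.List.pyGetD number i 0 ≤ c.getD (PySem.List.pyGetD want i "") 0)) := by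
  induction l with
  | nil => rfl
  | cons i rest ih =>
      simp only [aInner, List.all_cons, ih]
      by_cases h : (c.contains (PySem.List.pyGetD want i "") &&
          decide (PySem.List.pyGetD number i 0 ≤ c.getD (PySem.List.pyGetD want i "") 0)) = true <;>
        simp [h]

lemma pv_acheck (want : List String) (number : List Int) (discount : List String)
    (i : Int) (h0 : 0 ≤ i) :
    aInner want number
        (PySem.Dict.counter (PySem.List.slice discount (some i) (some (i + 10))))
        (PySem.List.pyRange 0 (want.length : Int) 1)
      = pvOk want number discount i.toNat := by
  rw [pv_aInner_all]
  rw [PySem.List.slice_toNat discount h0 (by omega)]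
  have h10 : (i + 10).toNat - i.toNat = 10 := by omega
  rw [h10]
  rw [PySem.List.pyRange_one]
  have hL : ((want.length : Int) - 0).toNat = want.length := by omega
  rw [hL, List.all_map]
  unfold pvOk pvWin
  apply List.all_congr rfl
  intro j
  simp only [Function.comp_apply, zero_add, PySem.List.pyGetD_natCast]
  rw [PySem.Dict.getD_counter, PySem.Dict.contains_counter]
  have hc : (List.take 10 (List.drop i.toNat discount)).contains (want.getD j "")
      = decide (0 < (List.take 10 (List.drop i.toNat discount)).count (want.getD j "")) := by
    simp [List.count_pos_iff]
  rw [hc]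

lemma pv_bok (want : List String) (number : List Int) (discount : List String)
    (hlen : want.length ≤ number.length) (k : Nat) (c : PySem.Dict String Int)
    (hinv : pvInv c discount k) :
    bOk c (want.zip number) = pvOk want number discount k := by
  unfold bOk pvOk
  rw [Bool.eq_iff_iff]
  simp only [List.all_eq_true, decide_eq_true_eq, Bool.and_eq_true, List.mem_range]
  constructor
  · intro h j hj
    have hz : j < (want.zip number).length := by
      rw [List.length_zip]; omega
    have hmem : (want.zip number)[j] ∈ want.zip number := List.getElem_mem hz
    have hc := h _ hmem
    rw [List.getElem_zip] at hc
    obtain ⟨hcon, hle⟩ := hc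
    rw [(hinv _).1] at hle
    rw [(hinv _).2] at hcon
    rw [List.getD_eq_getElem want "" hj, List.getD_eq_getElem number 0 (by omega)]
    exact ⟨of_decide_eq_true hcon, hle⟩
  · intro h p hp
    rcases List.mem_iff_getElem.mp hp with ⟨j, hj, hpe⟩
    have hjw : j < want.length := by
      rw [List.length_zip] at hj; omega
    have := h j hjw
    rw [List.getD_eq_getElem want "" hjw, List.getD_eq_getElem number 0 (by omega)] at this
    obtain ⟨hpos, hle⟩ := this
    subst hpe
    rw [List.getElem_zip, (hinv _).1, (hinv _).2]
    exact ⟨decide_eq_true hpos, hle⟩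

lemma pv_win_cons (d : List String) (k : Nat) (h : k < d.length) :
    pvWin d k = d.getD k "" :: List.take 9 (List.drop (k + 1) d) := by
  unfold pvWin
  rw [List.drop_eq_getElem_cons h, List.getD_eq_getElem d "" h]
  rfl

lemma pv_win_snoc (d : List String) (k : Nat) (h : k + 11 ≤ d.length) :
    pvWin d (k + 1) = List.take 9 (List.drop (k + 1) d) ++ [d.getD (k + 10) ""] := by
  have hk10 : k + 10 < d.length := by omega
  have h9 : (List.drop (k + 1) d)[9]? = some (d.getD (k + 10) "") := by
    rw [List.getElem?_drop, List.getD_eq_getElem d "" hk10]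
    exact List.getElem?_eq_getElem (by omega)
  have htk := List.take_add_one (l := List.drop (k + 1) d) (i := 9)
  rw [h9] at htk
  norm_num at htk
  unfold pvWin
  exact htk

lemma pv_slide (d : List String) (k : Nat) (h : k + 11 ≤ d.length) (x : String) :
    ((pvWin d (k + 1)).count x : Int)
      = ((pvWin d k).count x : Int)
        - (if d.getD k "" = x then 1 else 0)
        + (if d.getD (k + 10) "" = x then 1 else 0) := by
  have hk : k < d.length := by omega
  have hk10 : k + 10 < d.length := by omega
  rw [pv_win_cons d k hk, pv_win_snoc d k h]
  simp only [List.count_append, List.count_cons, List.count_nil, beq_iff_eq]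
  push_cast
  split_ifs <;> ring

lemma pv_sum_nil (want : List String) (number : List Int) (discount : List String)
    {j N : Int} (h : N ≤ j) : pvSum want number discount j N = 0 := by
  unfold pvSum; rw [PySem.List.pyRange_one_eq_nil h]; rfl

lemma pv_sum_cons (want : List String) (number : List Int) (discount : List String)
    {j N : Int} (h : j < N) :
    pvSum want number discount j N
      = (if pvOk want number discount j.toNat then (1 : Int) else 0)
        + pvSum want number discount (j + 1) N := by
  unfold pvSum; rw [PySem.List.pyRange_one_cons h]; simp

lemma pv_aFold (want : List String) (number : List Int) (discount : List String) :
    ∀ (m : Nat) (j ans : Int), 0 ≤ j → m = (((discount.length : Int) - 9) - j).toNat →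
    ((PySem.List.pyRange j ((discount.length : Int) - 9) 1).foldl
      (fun answer i =>
        let counter := PySem.Dict.counter (PySem.List.slice discount (some i) (some (i + 10)))
        if aInner want number counter (PySem.List.pyRange 0 (want.length : Int) 1) then answer + 1
        else answer)
      ans)
      = ans + pvSum want number discount j ((discount.length : Int) - 9) := by
  intro m
  induction m with
  | zero =>
      intro j ans h0 hm
      have hN : (discount.length : Int) - 9 ≤ j := by omega
      rw [PySem.List.pyRange_one_eq_nil hN, pv_sum_nil want number discount hN]
      simp
  | succ m ih =>
      intro j ans h0 hm
      have hj : j < (discount.length : Int) - 9 := by omega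
      rw [PySem.List.pyRange_one_cons hj]
      simp only [List.foldl_cons]
      rw [pv_acheck want number discount j h0]
      rw [ih (j + 1) _ (by omega) (by omega)]
      rw [pv_sum_cons want number discount hj]
      split_ifs <;> ring

-- one sliding step preserves the invariant
lemma pv_step (discount : List String) (k : Nat) (c : PySem.Dict String Int)
    (hfit : k + 11 ≤ discount.length) (hinv : pvInv c discount k) :
    pvInv
      (let out := discount.getD k ""
       let c1 := c.modify out 0 (· - 1)
       let c2 := if c1.getD out 0 == 0 then c1.erase out else c1
       c2.modify (discount.getD (k + 10) "") 0 (· + 1))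
      discount (k + 1) := by
  intro x
  have hk : k < discount.length := by omega
  have hk10 : k + 10 < discount.length := by omega
  set outk := discount.getD k "" with hout
  set ink := discount.getD (k + 10) "" with hin
  set c1 := c.modify outk 0 (· - 1) with hc1
  set c2 := if c1.getD outk 0 == 0 then c1.erase outk else c1 with hc2
  -- counts in c1
  have hgd1 : ∀ y, c1.getD y 0 = c.getD y 0 - (if outk = y then 1 else 0) := by
    intro y
    rw [hc1, PySem.Dict.getD_modify]
    by_cases h1 : y = outk
    · rw [if_pos h1, h1, if_pos rfl]
    · rw [if_neg h1, if_neg (show ¬(outk = y) from fun h => h1 h.symm)]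
      ring
  -- c2 has the same counts as c1
  have hgd2 : ∀ y, c2.getD y 0 = c1.getD y 0 := by
    intro y
    rw [hc2]
    split_ifs with hz
    · rw [pv_getD_erase]
      split_ifs with hy
      · subst hy
        exact (by simpa using hz : c1.getD outk 0 = 0).symm
      · rfl
    · rfl
  -- count of x in the new window
  have hcount : ((pvWin discount (k + 1)).count x : Int)
      = c.getD x 0 - (if outk = x then 1 else 0) + (if ink = x then 1 else 0) := by
    rw [pv_slide discount k hfit x, (hinv x).1]
  have hgd3 : (c2.modify ink 0 (· + 1)).getD x 0 = ((pvWin discount (k + 1)).count x : Int) := by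
    rw [PySem.Dict.getD_modify, hcount]
    by_cases h1 : x = ink
    · rw [if_pos h1, hgd2, hgd1, h1, if_pos rfl]
    · rw [if_neg h1, hgd2, hgd1, if_neg (show ¬(ink = x) from fun h => h1 h.symm)]
      ring
  refine ⟨hgd3, ?_⟩
  -- membership side
  rw [PySem.Dict.contains_modify, ← hc1, ← hc2]
  by_cases hxin : x = ink
  · have hx1 : (x == ink) = true := by simp [hxin]
    rw [hx1, Bool.true_or]
    have hmem : x ∈ pvWin discount (k + 1) := by
      rw [pv_win_snoc discount k hfit]
      simp [hxin, hin]
    have hp := List.count_pos_iff.mpr hmem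
    simp [hp]
  · have hbeq : (x == ink) = false := by simp [hxin]
    rw [hbeq, Bool.false_or]
    by_cases hxout : x = outk
    · -- the leaving key: new count is old - 1; key kept iff it stays positive
      have hnew : ((pvWin discount (k + 1)).count x : Int) = c.getD x 0 - 1 := by
        rw [hcount, if_pos hxout.symm,
          if_neg (show ¬(ink = x) from fun h => hxin h.symm)]
        ring
      have hc1v : c1.getD x 0 = c.getD x 0 - 1 := by
        have := hgd1 x
        rw [if_pos hxout.symm] at this
        omega
      by_cases hz : c1.getD outk 0 = 0
      · have hc2e : c2 = c1.erase outk := by rw [hc2, if_pos (by simp [hz])]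
        rw [hc2e, pv_contains_erase, if_pos hxout]
        have hzx : c1.getD x 0 = 0 := by rw [hxout]; exact hz
        have h0 : ((pvWin discount (k + 1)).count x : Int) = 0 := by
          rw [hnew]; omega
        have hzn : (pvWin discount (k + 1)).count x = 0 := by exact_mod_cast h0
        simp [hzn]
      · have hc2e : c2 = c1 := by rw [hc2, if_neg (by simp [hz])]
        rw [hc2e, hc1, PySem.Dict.contains_modify]
        have hx1 : (x == outk) = true := by simp [hxout]
        rw [hx1, Bool.true_or]
        have hzx : c1.getD x 0 ≠ 0 := by rw [hxout]; exact hz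
        have hip : (0 : Int) < ((pvWin discount (k + 1)).count x : Int) := by
          rw [hnew]; omega
        have hp : 0 < (pvWin discount (k + 1)).count x := by exact_mod_cast hip
        simp [hp]
    · -- untouched key: membership and count unchanged
      have hsame : ((pvWin discount (k + 1)).count x : Int) = ((pvWin discount k).count x : Int) := by
        rw [hcount, if_neg (show ¬(outk = x) from fun h => hxout h.symm),
          if_neg (show ¬(ink = x) from fun h => hxin h.symm), (hinv x).1]
        ring
      have hc2c : c2.contains x = c.contains x := by
        rw [hc2]
        split_ifs with hz
        · rw [pv_contains_erase, if_neg hxout, hc1, PySem.Dict.contains_modify]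
          simp [hxout]
        · rw [hc1, PySem.Dict.contains_modify]
          simp [hxout]
      rw [hc2c, (hinv x).2]
      have hn : (pvWin discount (k + 1)).count x = (pvWin discount k).count x := by
        exact_mod_cast hsame
      rw [hn]

lemma pv_bFold (want : List String) (number : List Int) (discount : List String)
    (hlen : want.length ≤ number.length) :
    ∀ (m : Nat) (j : Int) (c : PySem.Dict String Int) (ans : Int),
      1 ≤ j → m = (((discount.length : Int) - 9) - j).toNat →
      pvInv c discount (j - 1).toNat →
      ((PySem.List.pyRange j ((discount.length : Int) - 9) 1).foldl
        (fun (s : PySem.Dict String Int × Int) i =>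
          let out := PySem.List.pyGetD discount (i - 1) ""
          let c1 := s.1.modify out 0 (· - 1)
          let c2 := if c1.getD out 0 == 0 then c1.erase out else c1
          let c3 := c2.modify (PySem.List.pyGetD discount (i + 9) "") 0 (· + 1)
          (c3, if bOk c3 (want.zip number) then s.2 + 1 else s.2))
        (c, ans)).2
      = ans + pvSum want number discount j ((discount.length : Int) - 9) := by
  intro m
  induction m with
  | zero =>
      intro j c ans h1 hm hinv
      have hN : (discount.length : Int) - 9 ≤ j := by omega
      rw [PySem.List.pyRange_one_eq_nil hN, pv_sum_nil want number discount hN]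
      simp
  | succ m ih =>
      intro j c ans h1 hm hinv
      have hj : j < (discount.length : Int) - 9 := by omega
      have hk1 : 1 ≤ j.toNat := by omega
      have hkfit : (j - 1).toNat + 11 ≤ discount.length := by omega
      rw [PySem.List.pyRange_one_cons hj]
      simp only [List.foldl_cons]
      have e1 : j - 1 = (((j - 1).toNat : Nat) : Int) := by omega
      have e2 : j + 9 = (((j - 1).toNat + 10 : Nat) : Int) := by omega
      rw [e1, e2, PySem.List.pyGetD_natCast, PySem.List.pyGetD_natCast]
      have hstep := pv_step discount (j - 1).toNat c hkfit hinv
      simp only at hstep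
      have hk : (j - 1).toNat + 1 = j.toNat := by omega
      rw [hk] at hstep
      rw [pv_bok want number discount hlen j.toNat _ hstep]
      have e4 : (j + 1 - 1 : Int).toNat = j.toNat := by omega
      rw [ih (j + 1) _ _ (by omega) (by omega) (by rw [e4]; exact hstep)]
      rw [pv_sum_cons want number discount hj]
      split_ifs <;> ring

-- ===== VERDICT (by name: the statement is the Claim_ definition above) =====
theorem solution_spec : Claim_equal_solution := by
  intro want number discount _dom hpre
  unfold Spec_solution
  by_cases h10 : discount.length < 10
  · have hA : solution want number discount = 0 := by
      unfold solution
      rw [PySem.List.pyRange_one_eq_nil (by omega : (discount.length : Int) - 9 ≤ 0)]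
      rfl
    have hB : solution_alt want number discount = 0 := by
      unfold solution_alt
      rw [if_pos h10]
    rw [hA, hB]
  · have hlen : want.length ≤ number.length := by
      cases hpre with
      | inl h => exact h
      | inr h => exact absurd h h10
    have hA : solution want number discount
        = 0 + pvSum want number discount 0 ((discount.length : Int) - 9) := by
      unfold solution
      exact pv_aFold want number discount (((discount.length : Int) - 9 - 0).toNat) 0 0 le_rfl rfl
    have hinv0 : pvInv (PySem.Dict.counter (PySem.List.slice discount none (some (10 : Int))))
        discount 0 := by
      intro x
      rw [PySem.Dict.getD_counter, PySem.Dict.contains_counter]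
      rw [PySem.List.slice_to discount (by norm_num)]
      unfold pvWin
      rw [List.drop_zero]
      have h10n : ((10 : Int)).toNat = 10 := rfl
      rw [h10n]
      refine ⟨rfl, ?_⟩
      simp [List.count_pos_iff]
    have hB : solution_alt want number discount
        = ((PySem.List.pyRange 1 ((discount.length : Int) - 9) 1).foldl
            (fun (s : PySem.Dict String Int × Int) i =>
              let out := PySem.List.pyGetD discount (i - 1) ""
              let c1 := s.1.modify out 0 (· - 1)
              let c2 := if c1.getD out 0 == 0 then c1.erase out else c1
              let c3 := c2.modify (PySem.List.pyGetD discount (i + 9) "") 0 (· + 1)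
              (c3, if bOk c3 (want.zip number) then s.2 + 1 else s.2))
            (PySem.Dict.counter (PySem.List.slice discount none (some (10 : Int))),
             if bOk (PySem.Dict.counter (PySem.List.slice discount none (some (10 : Int))))
                  (want.zip number) then 1 else 0)).2 := by
      unfold solution_alt
      rw [if_neg h10]
    rw [hA, hB]
    rw [pv_bok want number discount hlen 0 _ hinv0]
    rw [pv_bFold want number discount hlen (((discount.length : Int) - 9 - 1).toNat) 1 _ _
        le_rfl rfl (by
          have h01 : ((1 : Int) - 1).toNat = 0 := by norm_num
          rw [h01]
          exact hinv0)]
    rw [pv_sum_cons want number discount (by omega : (0 : Int) < (discount.length : Int) - 9)]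
    norm_num
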